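-- pv_equiv track=rewrite | github.com/mantianwuming/work_test | work/sougou_test2_error.py | cal_time
-- ===== SOURCE A (Python) =====
-- def cal_time(dic_tree, k):
--     res = {}
--     count = 0
--     for i in dic_tree.items():
--         if i[0] not in res:
--             res[i[0]] = count
--         count += 1
--         for j in i[1]:
--             if j not in res:
--                 res[j] = count
--     return count
-- ===== SOURCE B (Python) =====
-- def cal_time(dic_tree, k):
--     # count increments once per dict entry and res is never used for the result
--     return len(dic_tree)
-- ===== Notes on version B (the rewrite author's own statement) =====
-- stated objective: simpler
-- what changed: Replaces A's loop over items (and its unused res-dict building) with the closed form len(dic_tree), since count is incremented exactly once per top-level key.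
import Mathlib
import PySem

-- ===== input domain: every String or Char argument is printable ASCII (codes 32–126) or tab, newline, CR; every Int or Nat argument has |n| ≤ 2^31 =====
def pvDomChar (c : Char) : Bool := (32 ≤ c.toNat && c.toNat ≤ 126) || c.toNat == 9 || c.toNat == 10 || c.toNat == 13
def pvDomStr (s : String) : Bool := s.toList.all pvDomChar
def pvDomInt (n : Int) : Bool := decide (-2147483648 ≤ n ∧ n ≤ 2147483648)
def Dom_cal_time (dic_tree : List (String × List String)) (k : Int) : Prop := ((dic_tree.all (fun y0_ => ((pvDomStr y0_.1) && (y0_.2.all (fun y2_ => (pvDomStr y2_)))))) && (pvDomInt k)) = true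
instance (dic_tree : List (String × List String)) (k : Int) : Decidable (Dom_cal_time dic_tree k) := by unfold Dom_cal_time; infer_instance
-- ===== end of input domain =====

-- ===== PORT A =====
-- B is the closed form len(dic_tree); A loops building an unused dict. Proved equal on all inputs.
def cal_time (dic_tree : List (String × List String)) (k : Int) : Int :=
  let st := dic_tree.foldl
    (fun (st : PySem.Dict String Int × Int) i =>
      let res := if (st.1.get? i.1).isNone then st.1.insert i.1 st.2 else st.1
      let count := st.2 + 1
      let res := i.2.foldl (fun r j => if (r.get? j).isNone then r.insert j count else r) res
      (res, count))
    (PySem.Dict.empty, 0)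
  st.2

-- ===== PORT B =====
def cal_time_alt (dic_tree : List (String × List String)) (k : Int) : Int :=
  (dic_tree.length : Int)

-- ===== PRECONDITION & SPEC =====
def Spec_cal_time (dic_tree : List (String × List String)) (k : Int) (out : Int) : Prop := out = cal_time_alt dic_tree k
instance (dic_tree : List (String × List String)) (k : Int) (out : Int) : Decidable (Spec_cal_time dic_tree k out) := by unfold Spec_cal_time; infer_instance

-- ===== CLAIM (what is proved, stated in full; the proofs are below) =====
def Claim_equal_cal_time : Prop := ∀ (dic_tree : List (String × List String)) (k : Int), Dom_cal_time dic_tree k → Spec_cal_time dic_tree k (cal_time dic_tree k)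

-- ===== LEMMAS AND PROOFS =====

-- The count component of A's fold increases by exactly the number of entries traversed.
theorem cal_time_foldl_snd (l : List (String × List String)) (st : PySem.Dict String Int × Int) :
    (l.foldl
      (fun (st : PySem.Dict String Int × Int) i =>
        let res := if (st.1.get? i.1).isNone then st.1.insert i.1 st.2 else st.1
        let count := st.2 + 1
        let res := i.2.foldl (fun r j => if (r.get? j).isNone then r.insert j count else r) res
        (res, count))
      st).2 = st.2 + (l.length : Int) := by
  induction l generalizing st with
  | nil => simp
  | cons hd tl ih =>
    simp only [List.foldl_cons, ih]
    push_cast [List.length_cons]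
    ring

-- ===== VERDICT (by name: the statement is the Claim_ definition above) =====
theorem cal_time_spec : Claim_equal_cal_time := by
  intro dic_tree k _
  unfold Spec_cal_time cal_time cal_time_alt
  rw [cal_time_foldl_snd]
  simp
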